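-- pv_equiv track=rewrite | github.com/qyuan2/TAGAPT_generated_samples | Find_hub_process_test.py | calcualte_candidate_hub_num
-- ===== SOURCE A (Python) =====
-- def calcualte_candidate_hub_num(candidate_hub,all_paths_reasonable):
--     candidate_hub_path_num = {}
--     for index in candidate_hub.keys():
--         count = 0
--         for j in range(len(all_paths_reasonable)):
--             if index in all_paths_reasonable[j]:
--                 count += 1
--         candidate_hub_path_num[index] = count
--     return (candidate_hub_path_num)
-- ===== SOURCE B (Python) =====
-- def calcualte_candidate_hub_num(candidate_hub, all_paths_reasonable):
--     counts = dict.fromkeys(candidate_hub, 0)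
--     for path in all_paths_reasonable:
--         for v in set(path):
--             if v in counts:
--                 counts[v] += 1
--     return counts
-- ===== Notes on version B (the rewrite author's own statement) =====
-- stated objective: faster
-- what changed: Instead of scanning every path once per candidate hub (nested loops, membership scan per pair), B makes a single pass over the paths, incrementing a counter dict keyed by the hubs for each distinct element of a path that is a candidate.
import Mathlib
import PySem

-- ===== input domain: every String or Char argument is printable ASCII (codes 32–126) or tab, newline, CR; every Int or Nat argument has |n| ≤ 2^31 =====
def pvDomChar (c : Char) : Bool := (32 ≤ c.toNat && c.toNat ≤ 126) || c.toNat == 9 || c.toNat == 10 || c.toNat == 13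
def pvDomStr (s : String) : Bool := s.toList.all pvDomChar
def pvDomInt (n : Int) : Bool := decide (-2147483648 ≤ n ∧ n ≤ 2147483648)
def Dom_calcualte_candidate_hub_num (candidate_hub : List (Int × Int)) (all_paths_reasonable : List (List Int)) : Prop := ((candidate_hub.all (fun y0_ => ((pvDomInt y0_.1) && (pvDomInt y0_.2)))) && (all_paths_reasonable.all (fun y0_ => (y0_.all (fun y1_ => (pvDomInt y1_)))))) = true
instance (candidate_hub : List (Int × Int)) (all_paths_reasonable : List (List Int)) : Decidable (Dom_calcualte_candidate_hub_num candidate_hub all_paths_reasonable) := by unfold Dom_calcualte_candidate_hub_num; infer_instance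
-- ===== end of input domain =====

-- B replaces A's per-hub scan of all paths (O(H*P*L)) by one pass over the paths with a counter dict keyed by the hubs (O(P*L + H)); measured faster in a timing run.


-- ===== PORT A =====
def calcualte_candidate_hub_num (candidate_hub : List (Int × Int)) (all_paths_reasonable : List (List Int)) : List (Int × Int) :=
  -- candidate_hub.keys(): the dict's keys, i.e. the distinct keys in first-occurrence order
  let keys := PySem.Set.ofList (candidate_hub.map (·.1))
  let result := keys.foldl (fun (acc : PySem.Dict Int Int) index =>
    let count := (PySem.List.pyRange 0 (all_paths_reasonable.length : Int) 1).foldl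
      (fun (count : Int) j =>
        if (PySem.List.pyGetD all_paths_reasonable j []).contains index then count + 1 else count) 0
    acc.insert index count) PySem.Dict.empty
  result.items

-- ===== PORT B =====
def calcualte_candidate_hub_num_alt (candidate_hub : List (Int × Int)) (all_paths_reasonable : List (List Int)) : List (Int × Int) :=
  -- counts = dict.fromkeys(candidate_hub, 0)
  let counts0 : PySem.Dict Int Int := candidate_hub.foldl (fun d p => d.insert p.1 0) PySem.Dict.empty
  -- for path in all_paths_reasonable: for v in set(path): if v in counts: counts[v] += 1
  let counts := all_paths_reasonable.foldl (fun d path =>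
    (PySem.Set.ofList path).foldl
      (fun (d : PySem.Dict Int Int) v => if d.contains v then d.modify v 0 (· + 1) else d) d) counts0
  counts.items

-- ===== PRECONDITION & SPEC =====
def Spec_calcualte_candidate_hub_num (candidate_hub : List (Int × Int)) (all_paths_reasonable : List (List Int)) (out : List (Int × Int)) : Prop := out = calcualte_candidate_hub_num_alt candidate_hub all_paths_reasonable
instance (candidate_hub : List (Int × Int)) (all_paths_reasonable : List (List Int)) (out : List (Int × Int)) : Decidable (Spec_calcualte_candidate_hub_num candidate_hub all_paths_reasonable out) := by unfold Spec_calcualte_candidate_hub_num; infer_instance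

-- ===== CLAIM (what is proved, stated in full; the proofs are below) =====
def Claim_equal_calcualte_candidate_hub_num : Prop := ∀ (candidate_hub : List (Int × Int)) (all_paths_reasonable : List (List Int)), Dom_calcualte_candidate_hub_num candidate_hub all_paths_reasonable → Spec_calcualte_candidate_hub_num candidate_hub all_paths_reasonable (calcualte_candidate_hub_num candidate_hub all_paths_reasonable)

-- ===== LEMMAS AND PROOFS =====

-- A's inner counting loop over a list of paths counts the paths containing k.
theorem pv_countA (paths : List (List Int)) (k : Int) (c : Int) :
    paths.foldl (fun c p => if p.contains k then c + 1 else c) c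
      = c + (paths.countP (fun p => p.contains k) : Int) := by
  induction paths generalizing c with
  | nil => simp
  | cons p ps ih =>
    simp only [List.foldl_cons, List.countP_cons]
    rw [ih]
    by_cases h : k ∈ p
    · simp [h]; omega
    · simp [h]

-- counts0's value at any key present is 0, and at any key it is 0 from a 0-dict.
theorem pv_getD_counts0 (l : List (Int × Int)) (d : PySem.Dict Int Int) (k : Int)
    (h : d.getD k 0 = 0) :
    (l.foldl (fun d p => d.insert p.1 (0:Int)) d).getD k 0 = 0 := by
  induction l generalizing d with
  | nil => simpa
  | cons p ps ih =>
    simp only [List.foldl_cons]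
    apply ih
    rw [PySem.Dict.getD_insert]
    split <;> simp [h]

-- the guarded inner set loop: keys unchanged
theorem pv_keys_inner (l : List Int) (d : PySem.Dict Int Int) :
    (l.foldl (fun (d : PySem.Dict Int Int) v => if d.contains v then d.modify v 0 (· + 1) else d) d).keys = d.keys := by
  induction l generalizing d with
  | nil => rfl
  | cons v vs ih =>
    simp only [List.foldl_cons]
    rw [ih]
    by_cases h : d.contains v = true
    · rw [if_pos h, PySem.Dict.keys_modify, PySem.Dict.keys_insert_of_contains _ _ h]
    · rw [if_neg h]

-- the guarded inner set loop adds 1 at a present key iff the (nodup) list contains it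
theorem pv_getD_inner (l : List Int) (d : PySem.Dict Int Int) (k : Int)
    (hnd : l.Nodup) (hk : d.contains k = true) :
    (l.foldl (fun (d : PySem.Dict Int Int) v => if d.contains v then d.modify v 0 (· + 1) else d) d).getD k 0
      = d.getD k 0 + (if k ∈ l then 1 else 0) := by
  induction l generalizing d with
  | nil => simp
  | cons v vs ih =>
    simp only [List.foldl_cons, List.mem_cons]
    have hnd' := (List.nodup_cons.mp hnd).2
    have hvnot := (List.nodup_cons.mp hnd).1
    by_cases hc : d.contains v = true
    · have hk' : (d.modify v 0 (· + 1)).contains k = true := by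
        rw [PySem.Dict.contains_modify]; simp [hk]
      rw [if_pos hc, ih _ hnd' hk', PySem.Dict.getD_modify]
      by_cases hkv : k = v
      · subst hkv
        have hnv : k ∉ vs := hvnot
        simp [hnv]
      · simp [hkv]
    · rw [if_neg hc, ih _ hnd' hk]
      have hkv : k ≠ v := by intro h; subst h; rw [hk] at hc; exact hc rfl
      simp [hkv]

-- the outer path loop adds the number of paths containing a present key
theorem pv_getD_outer (paths : List (List Int)) (d : PySem.Dict Int Int) (k : Int)
    (hk : d.contains k = true) :
    (paths.foldl (fun d path =>
        (PySem.Set.ofList path).foldl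
          (fun (d : PySem.Dict Int Int) v => if d.contains v then d.modify v 0 (· + 1) else d) d) d).getD k 0
      = d.getD k 0 + (paths.countP (fun p => p.contains k) : Int) := by
  induction paths generalizing d with
  | nil => simp
  | cons p ps ih =>
    simp only [List.foldl_cons, List.countP_cons]
    have hk' : ((PySem.Set.ofList p).foldl
        (fun (d : PySem.Dict Int Int) v => if d.contains v then d.modify v 0 (· + 1) else d) d).contains k = true := by
      rw [PySem.Dict.contains_iff_mem_keys] at hk ⊢
      rw [pv_keys_inner]; exact hk
    rw [ih _ hk', pv_getD_inner _ _ _ (PySem.Set.nodup_ofList p) hk]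
    by_cases h : k ∈ p
    · simp [PySem.Set.mem_ofList, h]
      omega
    · simp [PySem.Set.mem_ofList, h]

-- the outer path loop never changes the keys
theorem pv_keys_outer (paths : List (List Int)) (d : PySem.Dict Int Int) :
    (paths.foldl (fun d path =>
        (PySem.Set.ofList path).foldl
          (fun (d : PySem.Dict Int Int) v => if d.contains v then d.modify v 0 (· + 1) else d) d) d).keys = d.keys := by
  induction paths generalizing d with
  | nil => rfl
  | cons p ps ih => simp only [List.foldl_cons]; rw [ih, pv_keys_inner]

-- keys of counts0 are the distinct candidate keys in order
theorem pv_keys_counts0 (l : List (Int × Int)) :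
    (l.foldl (fun (d : PySem.Dict Int Int) p => d.insert p.1 0) PySem.Dict.empty).keys
      = PySem.Set.ofList (l.map (·.1)) := by
  rw [PySem.Dict.keys_foldl_insert_key]
  simp [PySem.Dict.keys_empty, PySem.Set.update_nil_left]

-- ===== VERDICT (by name: the statement is the Claim_ definition above) =====
theorem calcualte_candidate_hub_num_spec : Claim_equal_calcualte_candidate_hub_num := by
  intro ch paths _
  unfold Spec_calcualte_candidate_hub_num calcualte_candidate_hub_num calcualte_candidate_hub_num_alt
  dsimp only
  set K := PySem.Set.ofList (ch.map (·.1)) with hK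
  have hKnd : K.Nodup := PySem.Set.nodup_ofList _
  set counts0 := ch.foldl (fun (d : PySem.Dict Int Int) p => d.insert p.1 0) PySem.Dict.empty with hc0
  set counts := paths.foldl (fun d path =>
    (PySem.Set.ofList path).foldl
      (fun (d : PySem.Dict Int Int) v => if d.contains v then d.modify v 0 (· + 1) else d) d) counts0 with hcounts
  -- A's items: fold of inserts over fresh distinct keys
  have hA := PySem.Dict.items_foldl_insert_fresh K (fun x => x)
    (fun index => (PySem.List.pyRange 0 (paths.length : Int) 1).foldl
      (fun (count : Int) j =>
        if (PySem.List.pyGetD paths j []).contains index then count + 1 else count) 0)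
    PySem.Dict.empty (by intro a _; simp) (by simpa using hKnd)
  simp only at hA
  -- B's keys
  have hkeys : counts.keys = K := by
    rw [hcounts, pv_keys_outer, hc0, pv_keys_counts0]
  have hknd : counts.keys.Nodup := by rw [hkeys]; exact hKnd
  rw [hA, PySem.Dict.items_eq_map_keys counts hknd 0, hkeys]
  have he : (PySem.Dict.empty : PySem.Dict Int Int).items = [] := rfl
  simp only [he, List.nil_append]
  apply List.map_congr_left
  intro k hkmem
  have hkc : counts0.contains k = true := by
    rw [PySem.Dict.contains_iff_mem_keys, hc0, pv_keys_counts0]; exact hkmem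
  have h0 : counts0.getD k 0 = 0 := pv_getD_counts0 ch PySem.Dict.empty k (by simp)
  rw [hcounts, pv_getD_outer paths counts0 k hkc, h0, zero_add,
    PySem.List.foldl_pyRange_zero_pyGetD' paths []
      (fun (count : Int) p => if p.contains k then count + 1 else count) 0, pv_countA]
  simp
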